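-- pv_equiv track=rewrite | github.com/elsa66666/MentraSuite | src/check_answer.py | check_answer_cr
-- ===== SOURCE A (Python) =====
-- def check_answer_cr(generated_reply, reference_answer, error_list):
--     generated_reply = generated_reply.split('\n')[-1]
--     check = False
--     generated_label = ''
--     for err in error_list:
--         if err.lower().replace('-', ' ') in generated_reply.lower().replace('-', ' '):
--             generated_label = err
--             break
--
--     reference_list = []
--     for err in error_list:
--         if err.lower().replace('-', ' ') in reference_answer.lower().replace('-', ' '):
--             reference_list.append(err)
--
--     # for reference_label in reference_answer:  # 答对一个就算对
--     #     reference_label = reference_label.strip()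
--     #     if generated_reply != '':
--     #         if reference_label.replace('-', ' ').lower() in generated_reply.replace('-', ' ').lower():
--     #             check = True
--     # for err in error_list:
--     #     if err.replace('-', ' ').lower() in generated_reply.replace('-', ' ').lower():
--     #         generated_label = err
--     if generated_label != '' and generated_label in reference_list:
--         check = True
--     return generated_label, check
-- ===== SOURCE B (Python) =====
-- def check_answer_cr(generated_reply, reference_answer, error_list):
--     last_line = generated_reply.split('\n')[-1]
--     norm = lambda s: s.lower().replace('-', ' ')
--     generated_label = next((err for err in error_list if norm(err) in norm(last_line)), '')
--     check = generated_label != '' and norm(generated_label) in norm(reference_answer)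
--     return generated_label, check
-- ===== Notes on version B (the rewrite author's own statement) =====
-- stated objective: faster
-- what changed: The second scan of error_list that builds reference_list is deleted: B finds the first matching label with next() over a generator and decides check by one direct substring test of the normalized label against the normalized reference answer.
import Mathlib
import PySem

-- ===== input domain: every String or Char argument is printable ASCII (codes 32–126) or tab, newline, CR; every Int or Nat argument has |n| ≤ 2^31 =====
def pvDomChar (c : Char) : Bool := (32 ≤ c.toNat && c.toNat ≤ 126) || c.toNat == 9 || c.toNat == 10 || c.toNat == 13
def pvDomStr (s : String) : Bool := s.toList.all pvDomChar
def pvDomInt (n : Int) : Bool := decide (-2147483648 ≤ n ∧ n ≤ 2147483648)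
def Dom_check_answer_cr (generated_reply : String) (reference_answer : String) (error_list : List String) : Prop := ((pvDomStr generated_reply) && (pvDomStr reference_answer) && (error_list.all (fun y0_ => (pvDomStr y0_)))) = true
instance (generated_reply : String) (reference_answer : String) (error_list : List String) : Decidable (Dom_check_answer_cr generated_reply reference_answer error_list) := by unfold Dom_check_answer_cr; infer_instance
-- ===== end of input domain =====

-- B deletes A's second scan of error_list (which built reference_list) and instead decides `check`
-- by one direct substring test of the normalized label against the normalized reference answer (objective: simpler).

-- the normalization expression `s.lower().replace('-', ' ')`, identical in both Pythons
def pyNorm (s : String) : String := PySem.Str.replace (PySem.Str.lower s) "-" " "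

-- ===== PORT A =====

-- A's first loop: `for err in error_list: if … : generated_label = err; break`
def caFirstLoop (line : String) : List String → String
  | [] => ""
  | err :: rest =>
    if PySem.Str.isIn (pyNorm err) (pyNorm line) then err else caFirstLoop line rest

def check_answer_cr (generated_reply : String) (reference_answer : String) (error_list : List String) : String × Bool :=
  -- generated_reply.split('\n')[-1]: split with a non-empty separator never returns an empty
  -- list, so Python's [-1] always succeeds; getLastD "" is exact here.
  let line := ((PySem.Str.split? generated_reply "\n").getD []).getLastD ""
  let generated_label := caFirstLoop line error_list
  -- A's second loop: reference_list built by appending each matching err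
  let reference_list := error_list.foldl
    (fun acc err => if PySem.Str.isIn (pyNorm err) (pyNorm reference_answer) then acc ++ [err] else acc) []
  let check := if generated_label ≠ "" ∧ generated_label ∈ reference_list then true else false
  (generated_label, check)

-- ===== PORT B =====

def check_answer_cr_alt (generated_reply : String) (reference_answer : String) (error_list : List String) : String × Bool :=
  -- generated_reply.split('\n')[-1]: split with a non-empty separator is never empty, getLastD "" is exact
  let last_line := ((PySem.Str.split? generated_reply "\n").getD []).getLastD ""
  -- next((err for err in error_list if norm(err) in norm(last_line)), '')
  let generated_label := (error_list.find? (fun err => PySem.Str.isIn (pyNorm err) (pyNorm last_line))).getD ""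
  let check := generated_label != "" && PySem.Str.isIn (pyNorm generated_label) (pyNorm reference_answer)
  (generated_label, check)

-- ===== PRECONDITION & SPEC =====
def Spec_check_answer_cr (generated_reply : String) (reference_answer : String) (error_list : List String) (out : String × Bool) : Prop := out = check_answer_cr_alt generated_reply reference_answer error_list
instance (generated_reply : String) (reference_answer : String) (error_list : List String) (out : String × Bool) : Decidable (Spec_check_answer_cr generated_reply reference_answer error_list out) := by unfold Spec_check_answer_cr; infer_instance

-- ===== CLAIM (what is proved, stated in full; the proofs are below) =====
def Claim_equal_check_answer_cr : Prop := ∀ (generated_reply : String) (reference_answer : String) (error_list : List String), Dom_check_answer_cr generated_reply reference_answer error_list → Spec_check_answer_cr generated_reply reference_answer error_list (check_answer_cr generated_reply reference_answer error_list)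

-- ===== LEMMAS AND PROOFS =====

-- A's break-loop computes the first match, i.e. find? with default ''
theorem caFirstLoop_eq_find (line : String) (el : List String) :
    caFirstLoop line el
      = (el.find? (fun err => PySem.Str.isIn (pyNorm err) (pyNorm line))).getD "" := by
  induction el with
  | nil => rfl
  | cons err rest ih =>
    simp only [caFirstLoop, pyNorm, pyNorm, List.find?_cons, PySem.Str.isIn_eq,
      PySem.Str.toList_replace, PySem.Str.toList_lower] at *
    cases h : PySem.Chars.isIn (PySem.Chars.replace (PySem.Chars.lower err.toList) ['-'] [' '])
        (PySem.Chars.replace (PySem.Chars.lower line.toList) ['-'] [' ']) with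
    | true => simp [h]
    | false => simp [h, ih]

-- A's membership test `generated_label != '' and generated_label in reference_list`
-- equals B's direct substring test, because the found label is itself an element of error_list
theorem ca_check_eq (line reference_answer : String) (el : List String) :
    (if (el.find? (fun err => PySem.Str.isIn (pyNorm err) (pyNorm line))).getD "" ≠ "" ∧
        (el.find? (fun err => PySem.Str.isIn (pyNorm err) (pyNorm line))).getD "" ∈
          el.filter (fun err => PySem.Str.isIn (pyNorm err) (pyNorm reference_answer)) then true else false)
      = (((el.find? (fun err => PySem.Str.isIn (pyNorm err) (pyNorm line))).getD "" != "") &&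
         PySem.Str.isIn (pyNorm ((el.find? (fun err => PySem.Str.isIn (pyNorm err) (pyNorm line))).getD ""))
           (pyNorm reference_answer)) := by
  cases hfind : el.find? (fun err => PySem.Str.isIn (pyNorm err) (pyNorm line)) with
  | none => simp
  | some g =>
    have hg_mem : g ∈ el := List.mem_of_find?_eq_some hfind
    simp only [Option.getD_some]
    by_cases hge : g = ""
    · subst hge; simp
    · -- g ∈ error_list, so membership in the filtered list is exactly the substring test
      simp [pyNorm, pyNorm, hg_mem, hge]

theorem check_answer_cr_spec' (generated_reply reference_answer : String)
    (error_list : List String) :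
    check_answer_cr generated_reply reference_answer error_list
      = check_answer_cr_alt generated_reply reference_answer error_list := by
  unfold check_answer_cr check_answer_cr_alt
  simp only [caFirstLoop_eq_find, PySem.List.foldl_append_if_eq_filter, List.nil_append]
  exact congrArg (Prod.mk _) (ca_check_eq _ reference_answer error_list)

-- ===== VERDICT (by name: the statement is the Claim_ definition above) =====
theorem check_answer_cr_spec : Claim_equal_check_answer_cr := by
  intro gr ra el _
  unfold Spec_check_answer_cr
  exact check_answer_cr_spec' gr ra el
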